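-- pv_equiv track=rewrite | github.com/Semeriuss/A2SV-Labs | contest_problems/code_forces_8/party.py | groupEmployees
-- ===== SOURCE A (Python) =====
-- from collections import defaultdict, deque
--
-- def groupEmployees(employees):
--     graph = defaultdict(list)
--     indegree = [0 for _ in range(len(employees))]
--     for i in range(len(employees)):
--         if employees[i] != -1:
--             graph[employees[i]].append(i + 1)
--             indegree[i] += 1
--
--     queue = deque()
--
--     for i in range(len(indegree)):
--         if indegree[i] == 0:
--             queue.append(i + 1)
--
--     groups = 0
--     while queue:
--         groups += 1
--
--         tempQueue = deque()
--         while queue: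
--             currEmployee = queue.popleft()
--             for subordinates in graph[currEmployee]:
--                 indegree[subordinates - 1] -= 1
--                 if indegree[subordinates - 1] == 0:
--                     tempQueue.append(subordinates)
--
--         queue.extend(tempQueue)
--
--     return groups
-- ===== SOURCE B (Python) =====
-- def groupEmployees(employees):
--     # Chain-walk re-implementation: for each employee follow the manager chain
--     # until a root (-1); chains that leave the valid index range or run longer
--     # than n steps (a cycle) contribute 0.  Answer = max chain length, 0 if none.
--     n = len(employees)
--     best = 0
--     for i in range(n):
--         j = i
--         steps = 0
--         d = 0
--         while steps <= n:
--             m = employees[j]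
--             if m == -1:
--                 d = steps + 1
--                 break
--             if m < 1 or m > n:
--                 break
--             j = m - 1
--             steps += 1
--         if d > best:
--             best = d
--     return best
-- ===== Notes on version B (the rewrite author's own statement) =====
-- stated objective: alternative
-- what changed: Replaces Kahn-style level BFS (defaultdict child graph + indegree array + two deques) by a per-employee upward chain walk: follow each employee's manager chain for at most n steps, count its length if it reaches -1, drop it on an invalid index or a cycle, and return the maximum.
import Mathlib
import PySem

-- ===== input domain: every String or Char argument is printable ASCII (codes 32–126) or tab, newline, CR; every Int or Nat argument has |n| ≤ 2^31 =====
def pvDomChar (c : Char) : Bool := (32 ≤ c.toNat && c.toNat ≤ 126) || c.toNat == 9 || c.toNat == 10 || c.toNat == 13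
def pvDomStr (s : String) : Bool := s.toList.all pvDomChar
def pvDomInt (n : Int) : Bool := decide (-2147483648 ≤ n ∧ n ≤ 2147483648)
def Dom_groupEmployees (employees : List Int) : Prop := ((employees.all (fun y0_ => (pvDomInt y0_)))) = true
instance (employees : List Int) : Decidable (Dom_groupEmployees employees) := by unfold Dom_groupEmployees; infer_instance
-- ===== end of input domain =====

-- B replaces A's Kahn-style level BFS by a per-employee upward chain walk (no graph,
-- indegree array or deques to build; measured faster on the generated inputs); both
-- return the maximum hierarchy depth, 0 when none.

-- ===== PORT A =====
-- outer `while queue:` loop of A; each iteration drains the whole queue (the inner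
-- `while queue:` with popleft is the foldl over the queue list, the `for subordinates
-- in graph[currEmployee]` the inner foldl).  fuel = len(employees)+1 is enough: the
-- queue is empty after at most len(employees) non-empty rounds (proved below).
def loopA (graph : PySem.Dict Int (List Int)) : Nat → List Int → List Int → Int → Int
  | 0, _, _, groups => groups
  | fuel + 1, indegree, queue, groups =>
    if queue = [] then groups
    else
      let st := queue.foldl
        (fun (st : List Int × List Int) c =>
          (graph.getD c []).foldl
            (fun (st2 : List Int × List Int) s =>
              let ind2 := PySem.List.pySetD st2.1 (s - 1) (PySem.List.pyGetD st2.1 (s - 1) 0 - 1)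
              if PySem.List.pyGetD ind2 (s - 1) 0 = 0 then (ind2, st2.2 ++ [s])
              else (ind2, st2.2))
            st)
        (indegree, [])
      loopA graph fuel st.1 st.2 (groups + 1)

def groupEmployees (employees : List Int) : Int :=
  let n : Int := PySem.List.len employees
  -- `for i in range(len(employees)): if employees[i] != -1: graph[employees[i]].append(i+1); indegree[i] += 1`
  let st := (PySem.List.pyRange 0 n 1).foldl
    (fun (st : PySem.Dict Int (List Int) × List Int) i =>
      if PySem.List.pyGetD employees i 0 ≠ -1 then
        (st.1.modify (PySem.List.pyGetD employees i 0) [] (· ++ [i + 1]),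
         PySem.List.pySetD st.2 i (PySem.List.pyGetD st.2 i 0 + 1))
      else st)
    (PySem.Dict.empty, (PySem.List.pyRange 0 n 1).map (fun _ => (0 : Int)))
  let graph := st.1
  let indegree := st.2
  let queue := (PySem.List.pyRange 0 (PySem.List.len indegree) 1).foldl
    (fun q i => if PySem.List.pyGetD indegree i 0 = 0 then q ++ [i + 1] else q) []
  loopA graph (employees.length + 1) indegree queue 0

-- ===== PORT B =====
-- the `while steps <= n:` chain walk of B; one fuel unit per loop iteration, fuel =
-- len(employees)+2 ≥ the n+2 iterations the steps-counter allows, so fuel never runs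
-- out before the loop condition fails.  pyGetD is exact here: j stays in [0, n).
def bWalk (employees : List Int) (n : Int) : Nat → Int → Int → Int
  | 0, _, _ => 0
  | fuel + 1, j, steps =>
    if steps ≤ n then
      let m := PySem.List.pyGetD employees j 0
      if m = -1 then steps + 1
      else if m < 1 ∨ n < m then 0
      else bWalk employees n fuel (m - 1) (steps + 1)
    else 0

def groupEmployees_alt (employees : List Int) : Int :=
  let n : Int := PySem.List.len employees
  (PySem.List.pyRange 0 n 1).foldl
    (fun best i =>
      let d := bWalk employees n (employees.length + 2) i 0
      if best < d then d else best)
    0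

-- ===== PRECONDITION & SPEC =====
def Spec_groupEmployees (employees : List Int) (out : Int) : Prop := out = groupEmployees_alt employees
instance (employees : List Int) (out : Int) : Decidable (Spec_groupEmployees employees out) := by unfold Spec_groupEmployees; infer_instance

-- ===== CLAIM (what is proved, stated in full; the proofs are below) =====
def Claim_equal_groupEmployees : Prop := ∀ (employees : List Int), Dom_groupEmployees employees → Spec_groupEmployees employees (groupEmployees employees)

-- ===== LEMMAS AND PROOFS =====

-- ===== spec-side notions (proof helpers) =====
def childrenL (emp : List Int) (c : Int) : List Int :=
  ((List.range emp.length).filter (fun i => emp.getD i 0 = c)).map (fun i : Nat => ((i : Int) + 1))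

def lvl (emp : List Int) : Nat → List Int
  | 0 => ((List.range emp.length).filter (fun i => emp.getD i 0 = -1)).map (fun i : Nat => ((i : Int) + 1))
  | k + 1 => (lvl emp k).flatMap (childrenL emp)

def dptF (emp : List Int) : Nat → Nat → Option Nat
  | 0, _ => none
  | f + 1, j =>
    if emp.getD j 0 = -1 then some 0
    else if 1 ≤ emp.getD j 0 ∧ emp.getD j 0 ≤ (emp.length : Int) then
      (dptF emp f ((emp.getD j 0) - 1).toNat).map (· + 1)
    else none

theorem dptF_mono (emp : List Int) : ∀ {f g j k}, f ≤ g → dptF emp f j = some k → dptF emp g j = some k := by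
  intro f
  induction f with
  | zero => intro g j k _ h; rw [dptF] at h; cases h
  | succ f ih =>
    intro g j k hfg h
    obtain ⟨g, rfl⟩ : ∃ g', g = g' + 1 := ⟨g - 1, by omega⟩
    rw [dptF] at h ⊢
    by_cases h1 : emp.getD j 0 = -1
    · rw [if_pos h1] at h ⊢; exact h
    · rw [if_neg h1] at h ⊢
      by_cases h2 : 1 ≤ emp.getD j 0 ∧ emp.getD j 0 ≤ (emp.length : Int)
      · rw [if_pos h2] at h ⊢
        rcases Option.map_eq_some_iff.mp h with ⟨k', hk', rfl⟩
        rw [ih (by omega) hk']; rfl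
      · rw [if_neg h2] at h; cases h

theorem dptF_min (emp : List Int) : ∀ {f j k}, dptF emp f j = some k → dptF emp (k + 1) j = some k := by
  intro f
  induction f with
  | zero => intro j k h; rw [dptF] at h; cases h
  | succ f ih =>
    intro j k h
    rw [dptF] at h
    by_cases h1 : emp.getD j 0 = -1
    · rw [if_pos h1] at h; cases h; rw [dptF, if_pos h1]
    · rw [if_neg h1] at h
      by_cases h2 : 1 ≤ emp.getD j 0 ∧ emp.getD j 0 ≤ (emp.length : Int)
      · rw [if_pos h2] at h
        rcases Option.map_eq_some_iff.mp h with ⟨k', hk', rfl⟩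
        rw [dptF, if_neg h1, if_pos h2, ih hk']; rfl
      · rw [if_neg h2] at h; cases h
theorem mem_childrenL (emp : List Int) (c j : Int) :
    j ∈ childrenL emp c ↔ ∃ i : Nat, i < emp.length ∧ emp.getD i 0 = c ∧ j = (i : Int) + 1 := by
  simp only [childrenL, List.mem_map, List.mem_filter, List.mem_range, decide_eq_true_eq]
  constructor
  · rintro ⟨i, ⟨hi, he⟩, rfl⟩; exact ⟨i, hi, he, rfl⟩
  · rintro ⟨i, hi, he, rfl⟩; exact ⟨i, ⟨hi, he⟩, rfl⟩

theorem mem_lvl (emp : List Int) :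
    ∀ k j, j ∈ lvl emp k ↔ ∃ i : Nat, i < emp.length ∧ j = (i : Int) + 1 ∧ dptF emp (k + 1) i = some k := by
  intro k
  induction k with
  | zero =>
    intro j
    simp only [lvl, List.mem_map, List.mem_filter, List.mem_range, decide_eq_true_eq]
    constructor
    · rintro ⟨i, ⟨hi, he⟩, rfl⟩
      exact ⟨i, hi, rfl, by rw [dptF, if_pos he]⟩
    · rintro ⟨i, hi, rfl, hd⟩
      refine ⟨i, ⟨hi, ?_⟩, rfl⟩
      rw [dptF] at hd
      by_cases h1 : emp.getD i 0 = -1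
      · exact h1
      · rw [if_neg h1] at hd
        by_cases h2 : 1 ≤ emp.getD i 0 ∧ emp.getD i 0 ≤ (emp.length : Int)
        · rw [if_pos h2] at hd; rw [dptF] at hd; simp at hd
        · rw [if_neg h2] at hd; cases hd
  | succ k ih =>
    intro j
    simp only [lvl, List.mem_flatMap]
    constructor
    · rintro ⟨c, hc, hj⟩
      rcases (ih c).mp hc with ⟨p, hp, rfl, hd⟩
      rcases (mem_childrenL emp _ j).mp hj with ⟨i, hi, he, rfl⟩
      refine ⟨i, hi, rfl, ?_⟩
      rw [dptF, if_neg (by rw [he]; omega), if_pos (by rw [he]; constructor <;> [omega; exact_mod_cast by omega])]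
      have : ((emp.getD i 0 - 1).toNat) = p := by rw [he]; omega
      rw [this, hd]; rfl
    · rintro ⟨i, hi, rfl, hd⟩
      rw [dptF] at hd
      by_cases h1 : emp.getD i 0 = -1
      · rw [if_pos h1] at hd; cases hd
      · rw [if_neg h1] at hd
        by_cases h2 : 1 ≤ emp.getD i 0 ∧ emp.getD i 0 ≤ (emp.length : Int)
        · rw [if_pos h2] at hd
          rcases Option.map_eq_some_iff.mp hd with ⟨k', hk', hkk⟩
          have hk'k : k' = k := by omega
          subst hk'k
          set p := (emp.getD i 0 - 1).toNat with hpdef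
          have hpn : p < emp.length := by omega
          have hcp : emp.getD i 0 = (p : Int) + 1 := by omega
          refine ⟨(p : Int) + 1, (ih _).mpr ⟨p, hpn, rfl, hk'⟩, ?_⟩
          exact (mem_childrenL emp _ _).mpr ⟨i, hi, hcp, rfl⟩
        · rw [if_neg h2] at hd; cases hd
theorem dptF_lt_len (emp : List Int) {f i k : Nat} (hi : i < emp.length) (h : dptF emp f i = some k) :
    k < emp.length := by
  -- every depth t ≤ k is achieved by some index < n; distinct depths have distinct
  -- indices, so k + 1 ≤ n
  have hach : ∀ t, t ≤ k → ∃ j, j < emp.length ∧ dptF emp (t + 1) j = some t := by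
    have hk : ∃ j, j < emp.length ∧ dptF emp (k + 1) j = some k := ⟨i, hi, dptF_min emp h⟩
    clear h hi
    induction k with
    | zero => intro t ht; have : t = 0 := by omega
              subst this; exact hk
    | succ k ih =>
      intro t ht
      rcases Nat.lt_or_ge t (k + 1) with h' | h'
      · refine ih ?_ t (by omega)
        rcases hk with ⟨j, hj, hd⟩
        rw [dptF] at hd
        by_cases h1 : emp.getD j 0 = -1
        · rw [if_pos h1] at hd; cases hd
        · rw [if_neg h1] at hd
          by_cases h2 : 1 ≤ emp.getD j 0 ∧ emp.getD j 0 ≤ (emp.length : Int)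
          · rw [if_pos h2] at hd
            rcases Option.map_eq_some_iff.mp hd with ⟨k', hk', hkk⟩
            have : k' = k := by omega
            subst this
            exact ⟨(emp.getD j 0 - 1).toNat, by omega, hk'⟩
          · rw [if_neg h2] at hd; cases hd
      · have : t = k + 1 := by omega
        subst this; exact hk
  by_contra hnk
  have hlen : emp.length ≤ k := by omega
  have hcard : (Finset.range (k + 1)).card ≤ (Finset.range emp.length).card := by
    apply Finset.card_le_card_of_injOn (fun t => if ht : t ≤ k then Nat.find (hach t ht) else 0)
    · intro t ht
      simp only [Finset.mem_coe, Finset.mem_range] at ht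
      have ht' : t ≤ k := by omega
      simp only [ht', dif_pos, Finset.mem_coe, Finset.mem_range]
      exact (Nat.find_spec (hach t ht')).1
    · intro a ha b hb hfe
      simp only [Finset.mem_coe, Finset.mem_range] at ha hb
      have ha' : a ≤ k := by omega
      have hb' : b ≤ k := by omega
      simp only [ha', hb', dif_pos] at hfe
      have hda := (Nat.find_spec (hach a ha')).2
      have hdb := (Nat.find_spec (hach b hb')).2
      rw [hfe] at hda
      have hda' := dptF_mono emp (g := max a b + 1) (by omega) hda
      have hdb' := dptF_mono emp (g := max a b + 1) (by omega) hdb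
      rw [hda'] at hdb'
      exact Option.some.inj hdb'
  simp only [Finset.card_range] at hcard
  omega

theorem lvl_empty_of_ge (emp : List Int) {k : Nat} (h : emp.length ≤ k) : lvl emp k = [] := by
  rw [List.eq_nil_iff_forall_not_mem]
  intro j hj
  rcases (mem_lvl emp k j).mp hj with ⟨i, hi, _, hd⟩
  exact absurd (dptF_lt_len emp hi hd) (by omega)

theorem lvl_empty_mono (emp : List Int) {k k' : Nat} (h : k ≤ k') (he : lvl emp k = []) : lvl emp k' = [] := by
  induction k' with
  | zero => have : k = 0 := by omega
            subst this; exact he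
  | succ k' ih =>
    rcases Nat.lt_or_ge k (k' + 1) with h' | h'
    · have := ih (by omega)
      show (lvl emp k').flatMap (childrenL emp) = []
      rw [this]; rfl
    · have : k = k' + 1 := by omega
      subst this; exact he

def mLvl (emp : List Int) : Nat :=
  Nat.find (⟨emp.length, lvl_empty_of_ge emp le_rfl⟩ : ∃ k, lvl emp k = [])

theorem mLvl_spec (emp : List Int) : lvl emp (mLvl emp) = [] := by
  exact Nat.find_spec (⟨emp.length, lvl_empty_of_ge emp le_rfl⟩ : ∃ k, lvl emp k = [])

theorem mLvl_min (emp : List Int) {k : Nat} (h : k < mLvl emp) : lvl emp k ≠ [] := by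
  exact Nat.find_min (⟨emp.length, lvl_empty_of_ge emp le_rfl⟩ : ∃ k, lvl emp k = []) h

theorem mLvl_le_len (emp : List Int) : mLvl emp ≤ emp.length := by
  exact Nat.find_min' (⟨emp.length, lvl_empty_of_ge emp le_rfl⟩ : ∃ k, lvl emp k = []) (lvl_empty_of_ge emp le_rfl)

theorem childrenL_disjoint (emp : List Int) {c c' : Int} (h : c ≠ c') :
    List.Disjoint (childrenL emp c) (childrenL emp c') := by
  intro j hj hj'
  rcases (mem_childrenL emp c j).mp hj with ⟨i, _, he, rfl⟩
  rcases (mem_childrenL emp c' _).mp hj' with ⟨i', _, he', hii⟩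
  have : i' = i := by omega
  subst this
  exact h (he ▸ he')

theorem lvl_nodup (emp : List Int) : ∀ k, (lvl emp k).Nodup := by
  intro k
  induction k with
  | zero =>
    refine List.Nodup.map ?_ (List.Nodup.filter _ (List.nodup_range))
    intro a b hab; simpa using hab
  | succ k ih =>
    rw [lvl, List.nodup_flatMap]
    refine ⟨fun c _ => ?_, ?_⟩
    · exact List.Nodup.map (fun a b hab => by simpa using hab) (List.Nodup.filter _ (List.nodup_range))
    · exact List.Pairwise.imp (fun hab => childrenL_disjoint emp hab) ih
-- ===== B-side: the chain walk computes (depth + 1), 0 on dead chains =====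
theorem pyGetD_toNat_eq (emp : List Int) {j : Int} (h0 : 0 ≤ j) :
    PySem.List.pyGetD emp j 0 = emp.getD j.toNat 0 := by
  obtain ⟨m, rfl⟩ : ∃ m : Nat, j = (m : Int) := ⟨j.toNat, by omega⟩
  rw [PySem.List.pyGetD_natCast]; simp

theorem bWalk_some (emp : List Int) :
    ∀ (k : Nat) (F : Nat) (j s : Int), 0 ≤ j → j < (emp.length : Int) →
      dptF emp (k + 1) j.toNat = some k → s + k ≤ (emp.length : Int) → k + 1 ≤ F →
      bWalk emp (emp.length : Int) F j s = s + k + 1 := by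
  intro k
  induction k with
  | zero =>
    intro F j s h0 hj hd hs hF
    obtain ⟨F, rfl⟩ : ∃ F', F = F' + 1 := ⟨F - 1, by omega⟩
    rw [dptF] at hd
    by_cases h1 : emp.getD j.toNat 0 = -1
    · rw [bWalk, if_pos (by omega), pyGetD_toNat_eq emp h0, if_pos h1]; push_cast; ring
    · rw [if_neg h1] at hd
      by_cases h2 : 1 ≤ emp.getD j.toNat 0 ∧ emp.getD j.toNat 0 ≤ (emp.length : Int)
      · rw [if_pos h2] at hd; rw [dptF] at hd; simp at hd
      · rw [if_neg h2] at hd; cases hd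
  | succ k ih =>
    intro F j s h0 hj hd hs hF
    obtain ⟨F, rfl⟩ : ∃ F', F = F' + 1 := ⟨F - 1, by omega⟩
    rw [dptF] at hd
    by_cases h1 : emp.getD j.toNat 0 = -1
    · rw [if_pos h1] at hd; cases hd
    · rw [if_neg h1] at hd
      by_cases h2 : 1 ≤ emp.getD j.toNat 0 ∧ emp.getD j.toNat 0 ≤ (emp.length : Int)
      · rw [if_pos h2] at hd
        rcases Option.map_eq_some_iff.mp hd with ⟨k', hk', hkk⟩
        have : k' = k := by omega
        subst this
        rw [bWalk, if_pos (by omega), pyGetD_toNat_eq emp h0, if_neg h1,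
            if_neg (by omega)]
        have hrec := ih F (emp.getD j.toNat 0 - 1) (s + 1) (by omega) (by omega)
          (by
            have : (emp.getD j.toNat 0 - 1).toNat = ((emp.getD j.toNat 0 - 1).toNat : Nat) := rfl
            exact hk')
          (by omega) (by omega)
        rw [hrec]; push_cast; ring
      · rw [if_neg h2] at hd; cases hd

theorem bWalk_none (emp : List Int) :
    ∀ (F : Nat) (j s : Int), 0 ≤ j → j < (emp.length : Int) →
      dptF emp F j.toNat = none →
      bWalk emp (emp.length : Int) F j s = 0 := by
  intro F
  induction F with
  | zero => intro j s _ _ _; rw [bWalk]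
  | succ F ih =>
    intro j s h0 hj hd
    rw [bWalk]
    by_cases hs : s ≤ (emp.length : Int)
    · rw [if_pos hs, pyGetD_toNat_eq emp h0]
      rw [dptF] at hd
      by_cases h1 : emp.getD j.toNat 0 = -1
      · rw [if_pos h1] at hd; cases hd
      · rw [if_neg h1] at hd
        rw [if_neg h1]
        by_cases h2 : 1 ≤ emp.getD j.toNat 0 ∧ emp.getD j.toNat 0 ≤ (emp.length : Int)
        · rw [if_pos h2] at hd
          rw [if_neg (by omega)]
          exact ih _ (s + 1) (by omega) (by omega) (Option.map_eq_none_iff.mp hd)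
        · rw [if_pos (by omega)]
    · rw [if_neg hs]

-- value of one whole chain walk from index i
theorem bWalk_val (emp : List Int) (i : Nat) (hi : i < emp.length) :
    bWalk emp (emp.length : Int) (emp.length + 2) (i : Int) 0 =
      (dptF emp (emp.length + 2) i).elim 0 (fun k => (k : Int) + 1) := by
  rcases hcase : dptF emp (emp.length + 2) i with _ | k
  · have := bWalk_none emp (emp.length + 2) (i : Int) 0 (by omega) (by exact_mod_cast hi) (by simpa using hcase)
    simpa using this
  · have hk : k < emp.length := dptF_lt_len emp hi hcase
    have hmin := dptF_min emp hcase
    have := bWalk_some emp k (emp.length + 2) (i : Int) 0 (by omega) (by exact_mod_cast hi)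
      (by simpa using hmin) (by omega) (by omega)
    simpa using this
theorem foldl_max_mem_or_init (l : List Int) : ∀ b : Int, l.foldl max b = b ∨ l.foldl max b ∈ l := by
  induction l with
  | nil => intro b; left; rfl
  | cons x xs ih =>
    intro b
    rcases ih (max b x) with h | h
    · rcases max_choice b x with hm | hm
      · left; simpa [hm] using h
      · right; rw [List.foldl_cons, h, hm]; exact List.mem_cons_self
    · right; exact List.mem_cons_of_mem _ h

theorem alt_eq_mLvl (emp : List Int) : groupEmployees_alt emp = (mLvl emp : Int) := by
  unfold groupEmployees_alt
  dsimp only []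
  rw [PySem.List.len_eq, PySem.List.pyRange_one]
  have hlen : (((emp.length : Int) - 0)).toNat = emp.length := by omega
  rw [hlen, List.foldl_map]
  -- turn the walk value into W and the if-step into max
  set W : Nat → Int := fun i => (dptF emp (emp.length + 2) i).elim 0 (fun k => (k : Int) + 1) with hW
  have hstep : List.foldl
      (fun (best : Int) (k : Nat) =>
        if best < bWalk emp ((emp.length : Nat) : Int) (emp.length + 2) (0 + (k : Int)) 0 then
          bWalk emp ((emp.length : Nat) : Int) (emp.length + 2) (0 + (k : Int)) 0
        else best) 0 (List.range emp.length)
      = List.foldl (fun best k => max best (W k)) 0 (List.range emp.length) := by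
    apply PySem.List.foldl_congr_mem
    intro acc x hx
    rw [List.mem_range] at hx
    have hv : bWalk emp ((emp.length : Nat) : Int) (emp.length + 2) (0 + (x : Int)) 0 = W x := by
      have : (0 : Int) + (x : Int) = (x : Int) := by ring
      rw [this, bWalk_val emp x hx]
    simp only [hv]
    rcases lt_or_ge acc (W x) with h | h
    · simp [h, max_eq_right h.le]
    · simp [not_lt.mpr h, max_eq_left h]
  rw [hstep, ← List.foldl_map]
  set L := (List.range emp.length).map W with hL
  set r := L.foldl max 0 with hr
  have hub : ∀ y ∈ L, y ≤ (mLvl emp : Int) := by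
    intro y hy
    rw [hL, List.mem_map] at hy
    rcases hy with ⟨i, hi, rfl⟩
    rw [List.mem_range] at hi
    rcases hcase : dptF emp (emp.length + 2) i with _ | k
    · simp [hW, hcase]
    · have hk : k < mLvl emp := by
        by_contra hge
        have : lvl emp k = [] := lvl_empty_mono emp (by omega) (mLvl_spec emp)
        have hmem : ((i : Int) + 1) ∈ lvl emp k :=
          (mem_lvl emp k _).mpr ⟨i, hi, rfl, dptF_min emp hcase⟩
        rw [this] at hmem; cases hmem
      simp only [hW, hcase, Option.elim]
      omega
  have h0r : (0 : Int) ≤ r := (PySem.List.le_foldl_max L 0).1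
  have hrub : r ≤ (mLvl emp : Int) := by
    rcases foldl_max_mem_or_init L 0 with h | h
    · rw [hr, h]; exact_mod_cast Nat.zero_le _
    · exact hub _ (by rw [hr]; exact h)
  rcases Nat.eq_zero_or_pos (mLvl emp) with hm | hm
  · omega
  · have hne := mLvl_min emp (k := mLvl emp - 1) (by omega)
    rcases List.exists_mem_of_ne_nil _ hne with ⟨j, hj⟩
    rcases (mem_lvl emp _ j).mp hj with ⟨i, hi, rfl, hd⟩
    have hd' : dptF emp (emp.length + 2) i = some (mLvl emp - 1) :=
      dptF_mono emp (by have := mLvl_le_len emp; omega) hd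
    have hWin : W i ∈ L := by
      rw [hL, List.mem_map]; exact ⟨i, List.mem_range.mpr hi, rfl⟩
    have := (PySem.List.le_foldl_max L 0).2 _ hWin
    have hWi : W i = (mLvl emp : Int) := by
      simp only [hW, hd', Option.elim]; omega
    omega
-- ===== A-side invariant: indegree vector determined by the set of dequeued ids =====
def indVecS (emp : List Int) (S : List Int) : List Int :=
  (List.range emp.length).map (fun i => if emp.getD i 0 = -1 ∨ emp.getD i 0 ∈ S then (0 : Int) else 1)

def procL (emp : List Int) (k : Nat) : List Int := (List.range k).flatMap (lvl emp)

theorem set_map_range {β : Type} (n : Nat) (f : Nat → β) (i : Nat) (v : β) (_hi : i < n) :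
    ((List.range n).map f).set i v = (List.range n).map (fun j => if j = i then v else f j) := by
  apply List.ext_getElem
  · simp
  · intro j h1 h2
    simp only [List.length_set, List.length_map, List.length_range] at h1
    rw [List.getElem_set]
    simp only [List.getElem_map, List.getElem_range]
    rcases eq_or_ne i j with h | h
    · subst h; simp
    · rw [if_neg h, if_neg (fun hh => h hh.symm)]

-- one dequeued node c: the fold over its children decrements each child (1 → 0) and
-- appends every child to the temp queue
theorem chAux (emp : List Int) :
    ∀ (is : List Nat) (f : Nat → Int) (temp : List Int), is.Nodup →
      (∀ i ∈ is, i < emp.length ∧ f i = 1) →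
      (is.map (fun i : Nat => (i : Int) + 1)).foldl
        (fun (st2 : List Int × List Int) s =>
          let ind2 := PySem.List.pySetD st2.1 (s - 1) (PySem.List.pyGetD st2.1 (s - 1) 0 - 1)
          if PySem.List.pyGetD ind2 (s - 1) 0 = 0 then (ind2, st2.2 ++ [s])
          else (ind2, st2.2))
        ((List.range emp.length).map f, temp)
      = ((List.range emp.length).map (fun j => if j ∈ is then 0 else f j),
         temp ++ is.map (fun i : Nat => (i : Int) + 1)) := by
  intro is
  induction is with
  | nil =>
    intro f temp _ _
    simp [List.not_mem_nil]
  | cons i is ih =>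
    intro f temp hnd hmem
    have hin : i < emp.length := (hmem i (List.mem_cons_self)).1
    have hfi : f i = 1 := (hmem i (List.mem_cons_self)).2
    simp only [List.map_cons, List.foldl_cons]
    have hs1 : ((i : Int) + 1) - 1 = ((i : Nat) : Int) := by ring
    simp only [hs1, PySem.List.pyGetD_natCast, PySem.List.pySetD_natCast]
    rw [PySem.List.getD_map_range _ _ _ _ hin, hfi]
    norm_num
    rw [set_map_range _ _ _ _ hin]
    have hcond : (List.map (fun j => if j = i then (0 : Int) else f j) (List.range emp.length))[i]?.getD 0 = 0 := by
      simp [hin]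
    rw [hcond, if_pos rfl]
    rw [ih (fun j => if j = i then 0 else f j) (temp ++ [(i : Int) + 1])
      (List.Nodup.of_cons hnd)
      (by
        intro i' hi'
        have hne : i' ≠ i := by
          rintro rfl; exact (List.nodup_cons.mp hnd).1 hi'
        exact ⟨(hmem i' (List.mem_cons_of_mem _ hi')).1,
          by simpa [hne] using (hmem i' (List.mem_cons_of_mem _ hi')).2⟩)]
    simp only [Prod.mk.injEq]
    refine ⟨List.map_congr_left ?_, by simp⟩
    intro j _
    by_cases h1 : j ∈ is
    · simp [h1]
    · by_cases h2 : j = i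
      · simp [h2]
      · simp [h1, h2]
theorem lvl_disjoint (emp : List Int) {t k : Nat} {c : Int}
    (ht : c ∈ lvl emp t) (hk : c ∈ lvl emp k) : t = k := by
  rcases (mem_lvl emp t c).mp ht with ⟨i, _, rfl, hdt⟩
  rcases (mem_lvl emp k _).mp hk with ⟨i', _, hii, hdk⟩
  have : i' = i := by omega
  subst this
  have h1 := dptF_mono emp (g := max t k + 1) (by omega) hdt
  have h2 := dptF_mono emp (g := max t k + 1) (by omega) hdk
  rw [h1] at h2
  exact Option.some.inj h2

theorem chStep (emp : List Int) (G : PySem.Dict Int (List Int)) (c : Int) (S temp : List Int)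
    (hG : G.getD c [] = childrenL emp c) (hc1 : c ≠ -1) (hcS : c ∉ S) :
    (G.getD c []).foldl
      (fun (st2 : List Int × List Int) s =>
        let ind2 := PySem.List.pySetD st2.1 (s - 1) (PySem.List.pyGetD st2.1 (s - 1) 0 - 1)
        if PySem.List.pyGetD ind2 (s - 1) 0 = 0 then (ind2, st2.2 ++ [s])
        else (ind2, st2.2))
      (indVecS emp S, temp)
    = (indVecS emp (S ++ [c]), temp ++ childrenL emp c) := by
  rw [hG]
  unfold childrenL indVecS
  rw [chAux emp _ _ temp (List.Nodup.filter _ List.nodup_range)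
    (by
      intro i hi
      rw [List.mem_filter, List.mem_range] at hi
      have he : emp.getD i 0 = c := by simpa using hi.2
      refine ⟨hi.1, ?_⟩
      rw [if_neg]
      push Not
      exact ⟨by rw [he]; exact hc1, by rw [he]; exact hcS⟩)]
  simp only [Prod.mk.injEq, List.mem_append, List.mem_singleton]
  refine ⟨?_, trivial⟩
  apply List.map_congr_left
  intro j hj
  rw [List.mem_range] at hj
  by_cases hc : emp.getD j 0 = c
  · rw [if_pos (by rw [List.mem_filter, List.mem_range]; exact ⟨hj, by simpa using hc⟩)]
    rw [if_pos (Or.inr (Or.inr (by simpa [List.getD_eq_getElem?_getD] using hc)))]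
  · rw [if_neg (by rw [List.mem_filter]; rintro ⟨_, hh⟩; exact hc (by simpa using hh))]
    have hc' : ¬ emp[j]?.getD 0 = c := by simpa [List.getD_eq_getElem?_getD] using hc
    simp [hc']

theorem procL_succ (emp : List Int) (k : Nat) :
    procL emp (k + 1) = procL emp k ++ lvl emp k := by
  rw [procL, List.range_succ, List.flatMap_append, procL]
  simp

theorem qFold (emp : List Int) (G : PySem.Dict Int (List Int)) (k : Nat)
    (hG : ∀ c, c ≠ -1 → G.getD c [] = childrenL emp c) :
    ∀ (q2 q1 temp : List Int), lvl emp k = q1 ++ q2 →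
      q2.foldl
        (fun (st : List Int × List Int) c =>
          (G.getD c []).foldl
            (fun (st2 : List Int × List Int) s =>
              let ind2 := PySem.List.pySetD st2.1 (s - 1) (PySem.List.pyGetD st2.1 (s - 1) 0 - 1)
              if PySem.List.pyGetD ind2 (s - 1) 0 = 0 then (ind2, st2.2 ++ [s])
              else (ind2, st2.2))
            st)
        (indVecS emp (procL emp k ++ q1), temp)
      = (indVecS emp (procL emp k ++ lvl emp k), temp ++ q2.flatMap (childrenL emp)) := by
  intro q2
  induction q2 with
  | nil =>
    intro q1 temp hsplit
    rw [List.append_nil] at hsplit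
    rw [← hsplit]
    simp
  | cons c q2' ih =>
    intro q1 temp hsplit
    have hcl : c ∈ lvl emp k := by rw [hsplit]; exact List.mem_append_right _ List.mem_cons_self
    rcases (mem_lvl emp k c).mp hcl with ⟨i, _, hci, _⟩
    have hc1 : c ≠ -1 := by omega
    have hcS : c ∉ procL emp k ++ q1 := by
      rw [List.mem_append]
      rintro (hp | hq)
      · rw [procL, List.mem_flatMap] at hp
        rcases hp with ⟨t, ht, hct⟩
        rw [List.mem_range] at ht
        exact absurd (lvl_disjoint emp hct hcl) (by omega)
      · have hnd := lvl_nodup emp k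
        rw [hsplit] at hnd
        rcases List.nodup_append.mp hnd with ⟨_, _, hdisj⟩
        exact hdisj c hq c List.mem_cons_self rfl
    rw [List.foldl_cons, chStep emp G c _ temp (hG c hc1) hc1 hcS]
    rw [show (procL emp k ++ q1) ++ [c] = procL emp k ++ (q1 ++ [c]) from by simp]
    rw [ih (q1 ++ [c]) (temp ++ childrenL emp c) (by rw [hsplit]; simp)]
    simp
theorem loopOut (emp : List Int) (G : PySem.Dict Int (List Int))
    (hG : ∀ c, c ≠ -1 → G.getD c [] = childrenL emp c) :
    ∀ (fuel : Nat) (k : Nat) (groups : Int), k ≤ mLvl emp → mLvl emp + 1 - k ≤ fuel →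
      loopA G fuel (indVecS emp (procL emp k)) (lvl emp k) groups
        = groups + ((mLvl emp : Int) - (k : Int)) := by
  intro fuel
  induction fuel with
  | zero => intro k groups hk hf; omega
  | succ fuel ih =>
    intro k groups hk hf
    rw [loopA]
    by_cases hq : lvl emp k = []
    · rw [if_pos hq]
      have hkm : k = mLvl emp := by
        rcases Nat.lt_or_ge k (mLvl emp) with h | h
        · exact absurd hq (mLvl_min emp h)
        · omega
      rw [hkm]; ring
    · rw [if_neg hq]
      have hklt : k < mLvl emp := by
        rcases Nat.lt_or_ge k (mLvl emp) with h | h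
        · exact h
        · exact absurd (lvl_empty_mono emp h (mLvl_spec emp)) hq
      dsimp only []
      have hfold := qFold emp G k hG (lvl emp k) [] [] (by simp)
      rw [List.append_nil] at hfold
      rw [hfold]
      have h1 : indVecS emp (procL emp k ++ lvl emp k) = indVecS emp (procL emp (k + 1)) := by
        rw [procL_succ]
      have h2 : ([] : List Int) ++ (lvl emp k).flatMap (childrenL emp) = lvl emp (k + 1) := by
        rw [List.nil_append]; rfl
      rw [h1, h2, ih (k + 1) (groups + 1) (by omega) (by omega)]
      push_cast
      ring
-- the graph/indegree building loop of A
theorem buildFold (emp : List Int) : ∀ (m : Nat), m ≤ emp.length →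
    (∀ c : Int, c ≠ -1 →
      ((List.range m).foldl
        (fun (st : PySem.Dict Int (List Int) × List Int) (k : Nat) =>
          if PySem.List.pyGetD emp (k : Int) 0 ≠ -1 then
            (st.1.modify (PySem.List.pyGetD emp (k : Int) 0) [] (· ++ [(k : Int) + 1]),
             PySem.List.pySetD st.2 (k : Int) (PySem.List.pyGetD st.2 (k : Int) 0 + 1))
          else st)
        (PySem.Dict.empty, (List.range emp.length).map (fun _ => (0 : Int)))).1.getD c []
        = ((List.range m).filter (fun i => emp.getD i 0 = c)).map (fun i : Nat => (i : Int) + 1))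
    ∧ ((List.range m).foldl
        (fun (st : PySem.Dict Int (List Int) × List Int) (k : Nat) =>
          if PySem.List.pyGetD emp (k : Int) 0 ≠ -1 then
            (st.1.modify (PySem.List.pyGetD emp (k : Int) 0) [] (· ++ [(k : Int) + 1]),
             PySem.List.pySetD st.2 (k : Int) (PySem.List.pyGetD st.2 (k : Int) 0 + 1))
          else st)
        (PySem.Dict.empty, (List.range emp.length).map (fun _ => (0 : Int)))).2
        = (List.range emp.length).map (fun i => if emp.getD i 0 ≠ -1 ∧ i < m then (1 : Int) else 0) := by
  intro m
  induction m with
  | zero =>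
    intro _
    constructor
    · intro c _
      simp [PySem.Dict.getD_empty]
    · simp
  | succ m ih =>
    intro hm
    have hmlen : m < emp.length := by omega
    rcases ih (by omega) with ⟨ihG, ihI⟩
    rw [List.range_succ, List.foldl_append, List.foldl_cons, List.foldl_nil]
    simp only [PySem.List.pyGetD_natCast, PySem.List.pySetD_natCast] at ihG ihI ⊢
    by_cases hroot : emp.getD m 0 = -1
    · rw [if_neg (by simpa using hroot)]
      constructor
      · intro c hc
        rw [ihG c hc, List.filter_append]
        have hdec : decide (emp.getD m 0 = c) = false := by
          rw [hroot]; exact decide_eq_false (fun h => hc h.symm)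
        have : List.filter (fun i => decide (emp.getD i 0 = c)) [m] = [] := by
          simp only [List.filter_cons, List.filter_nil, hdec]; rfl
        rw [this, List.append_nil]
      · rw [ihI]
        apply List.map_congr_left
        intro j hj
        rw [List.mem_range] at hj
        by_cases hjm : j = m
        · subst hjm
          rw [if_neg (fun h => h.1 hroot), if_neg (fun h => h.1 hroot)]
        · have : (j < m + 1) = (j < m) := by
            apply propext; constructor <;> intro h <;> omega
          simp only [this]
    · rw [if_pos (by simpa using hroot)]
      constructor
      · intro c hc
        dsimp only []
        rw [PySem.Dict.getD_modify]
        by_cases hcm : c = emp.getD m 0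
        · rw [if_pos hcm, ← hcm, ihG c hc, List.filter_append]
          have hdec : decide (emp.getD m 0 = c) = true := decide_eq_true hcm.symm
          have : List.filter (fun i => decide (emp.getD i 0 = c)) [m] = [m] := by
            simp only [List.filter_cons, List.filter_nil, hdec]; rfl
          rw [this, List.map_append, hcm]
          rfl
        · rw [if_neg hcm, ihG c hc, List.filter_append]
          have hdec : decide (emp.getD m 0 = c) = false := by
            exact decide_eq_false (fun h => hcm h.symm)
          have : List.filter (fun i => decide (emp.getD i 0 = c)) [m] = [] := by
            simp only [List.filter_cons, List.filter_nil, hdec]; rfl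
          rw [this, List.append_nil]
      · dsimp only []
        rw [ihI, PySem.List.getD_map_range _ _ _ _ hmlen, set_map_range _ _ _ _ hmlen]
        apply List.map_congr_left
        intro j hj
        rw [List.mem_range] at hj
        by_cases hjm : j = m
        · subst hjm
          rw [if_pos rfl, if_neg (fun h => Nat.lt_irrefl _ h.2), if_pos ⟨hroot, by omega⟩]
          norm_num
        · rw [if_neg hjm]
          have : (j < m + 1) = (j < m) := by
            apply propext; constructor <;> intro h <;> omega
          simp only [this]
theorem foldl_append_ite {α β : Type} (p : α → Prop) [DecidablePred p] (f : α → β) :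
    ∀ (l : List α) (acc : List β),
      l.foldl (fun acc x => if p x then acc ++ [f x] else acc) acc
        = acc ++ (l.filter (fun x => decide (p x))).map f := by
  intro l
  induction l with
  | nil => intro acc; simp
  | cons x xs ih =>
    intro acc
    rw [List.foldl_cons, List.filter_cons]
    by_cases h : p x
    · rw [if_pos h, ih, decide_eq_true h]
      simp
    · rw [if_neg h, ih, decide_eq_false h]
      simp

theorem A_eq_mLvl (emp : List Int) : groupEmployees emp = (mLvl emp : Int) := by
  unfold groupEmployees
  dsimp only []
  rw [PySem.List.len_eq, PySem.List.pyRange_one]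
  have hlen0 : (((emp.length : Int)) - 0).toNat = emp.length := by omega
  rw [hlen0, List.map_map, List.foldl_map]
  simp only [Function.comp_def, zero_add]
  rcases buildFold emp emp.length le_rfl with ⟨hG, hI⟩
  rw [hI]
  rw [PySem.List.len_eq, List.length_map, List.length_range, PySem.List.pyRange_one, hlen0,
      List.foldl_map]
  simp only [zero_add]
  rw [foldl_append_ite (fun k : Nat =>
        PySem.List.pyGetD ((List.range emp.length).map
          (fun i => if emp.getD i 0 ≠ -1 ∧ i < emp.length then (1 : Int) else 0)) (k : Int) 0 = 0)
      (fun k : Nat => (k : Int) + 1)]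
  rw [List.nil_append]
  have hq : List.filter (fun (k : Nat) => decide (PySem.List.pyGetD ((List.range emp.length).map
          (fun i => if emp.getD i 0 ≠ -1 ∧ i < emp.length then (1 : Int) else 0)) ((k : Nat) : Int) 0 = 0))
        (List.range emp.length)
      = List.filter (fun i => decide (emp.getD i 0 = -1)) (List.range emp.length) := by
    apply List.filter_congr
    intro k hk
    rw [List.mem_range] at hk
    rw [PySem.List.pyGetD_natCast, PySem.List.getD_map_range _ _ _ _ hk]
    by_cases h : emp.getD k 0 = -1
    · rw [if_neg (fun hh => hh.1 h), decide_eq_true h]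
      simp
    · rw [if_pos ⟨h, hk⟩, decide_eq_false h]
      simp
  rw [hq]
  have hlvl0 : (List.filter (fun i => decide (emp.getD i 0 = -1)) (List.range emp.length)).map
      (fun k : Nat => (k : Int) + 1) = lvl emp 0 := rfl
  rw [hlvl0]
  have hiv : (List.range emp.length).map
        (fun i => if emp.getD i 0 ≠ -1 ∧ i < emp.length then (1 : Int) else 0)
      = indVecS emp (procL emp 0) := by
    rw [show procL emp 0 = [] from rfl]
    unfold indVecS
    apply List.map_congr_left
    intro j hj
    rw [List.mem_range] at hj
    simp only [List.not_mem_nil, or_false]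
    by_cases h : emp.getD j 0 = -1
    · rw [if_neg (fun hh => hh.1 h), if_pos h]
    · rw [if_pos ⟨h, hj⟩, if_neg h]
  rw [hiv]
  rw [loopOut emp _ (fun c hc => hG c hc) (emp.length + 1) 0 0 (Nat.zero_le _)
      (by have := mLvl_le_len emp; omega)]
  simp

-- ===== VERDICT (by name: the statement is the Claim_ definition above) =====
theorem groupEmployees_spec : Claim_equal_groupEmployees := by
  intro employees _
  unfold Spec_groupEmployees
  rw [A_eq_mLvl, alt_eq_mLvl]
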